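-- pv_equiv track=rewrite | github.com/Cpasgrave/P.E. | PE_0086_Cuboid_route.py | PE86
-- ===== SOURCE A (Python) =====
-- def PE86(target):
--
--     # x,y,z les cotés du cuboide
--     # a,b,c les cotés du triangle rectangle
--
--     # precalcul des carrés, sur une plage estimée, à corriger au besoin...
--     squared = {}
--     squares = {}
--     for n in range(1,10_000):
--         sq = n*n
--         squares[n] = sq
--         squared[sq] = n
--
--     a = 0 # a est aussi M, la limite max pour x,y et z
--     ct = 0 # le nombre de solutions rencontrées
--
--     while ct<target:
--         a += 1 # on fait progresser a, donc M
--         for b in range(1,2*a+1): # b peut valoir jusqu'à 2M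
--             a2b2 = squares[a]+squares[b]
--             if a2b2 in squared:
--                 # pas besoin de calculer c
--                 for y in range(1,b//2+1):
--                     # pour éviter les doublons, y peut aller jusqu'à b//2
--                     # et pour vérifier que M n'est pas dépassé par aucun des x,y,z
--                     # comme z = b-y, il ne faut pas que z dépasse a
--                     ct += b-y<=a
--     return a
-- ===== SOURCE B (Python) =====
-- def PE86(target):
--     # Same search, but: (1) the inner y-loop of A is replaced by a closed-form
--     # interval length, and (2) the perfect-square test uses a rising two-pointer
--     # c (amortised O(1) per b) instead of a precomputed 10^4-entry square table.
--     a = 0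
--     ct = 0
--     while ct < target:
--         a += 1
--         c = a
--         for b in range(1, 2 * a + 1):
--             s = a * a + b * b
--             while c * c < s:
--                 c += 1
--             if c * c == s:
--                 lo = b - a
--                 if lo < 1:
--                     lo = 1
--                 hi = b // 2
--                 if hi >= lo:
--                     ct += hi - lo + 1
--     return a
-- ===== Notes on version B (the rewrite author's own statement) =====
-- stated objective: alternative
-- what changed: B drops A's precomputed 10^4-entry square dictionaries in favour of a rising two-pointer perfect-square test (amortised O(1) per b) and replaces A's inner y-counting loop by a closed-form interval length.
-- outside the precondition, e.g. on PE86(6865069): A returns 4516, B returns 4515; on PE86(8479694): A raises KeyError, B returns 4995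
import Mathlib
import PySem

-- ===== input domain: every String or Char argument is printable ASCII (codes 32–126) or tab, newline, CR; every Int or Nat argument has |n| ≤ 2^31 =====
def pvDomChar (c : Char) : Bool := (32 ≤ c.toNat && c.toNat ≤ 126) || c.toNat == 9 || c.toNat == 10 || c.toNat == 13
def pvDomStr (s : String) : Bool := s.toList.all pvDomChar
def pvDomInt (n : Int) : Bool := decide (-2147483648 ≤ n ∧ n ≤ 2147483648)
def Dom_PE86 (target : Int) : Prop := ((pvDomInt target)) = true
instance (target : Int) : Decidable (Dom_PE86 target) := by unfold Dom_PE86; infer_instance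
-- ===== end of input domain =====

-- B replaces A's precomputed square dictionaries by a rising two-pointer square test and
-- A's inner y-counting loop by a closed-form interval length (objective: alternative).


-- ===== PORT A =====
-- the two dicts A precomputes: squares[n] = n*n and squared[n*n] = n for n in range(1,10000).
-- They are ported as hash maps (exact here: the keys are distinct and the dicts are only
-- ever point-read, never iterated), because an association list makes evaluation infeasible.
def pvTables : Std.HashMap Int Int × Std.HashMap Int Int :=
  (PySem.List.pyRange 1 10000 1).foldl
    (fun p n => let sq := n * n; (p.1.insert n sq, p.2.insert sq n))
    (∅, ∅)

-- for y in range(1, b//2+1): ct += b-y<=a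
def pvYLoopA (a b ct : Int) : Int :=
  (PySem.List.pyRange 1 (PySem.Int.floordiv b 2 + 1) 1).foldl
    (fun ct y => ct + (if b - y ≤ a then 1 else 0)) ct

-- for b in range(1, 2*a+1): …   (squares[a]/squares[b]: the keys 1..9999 are always
-- present for the a,b reached under Pre_, so the getD default is never used)
def pvBLoopA (squares squared : Std.HashMap Int Int) (a ct : Int) : Int :=
  (PySem.List.pyRange 1 (2 * a + 1) 1).foldl
    (fun ct b =>
      let a2b2 := squares.getD a 0 + squares.getD b 0
      if squared.contains a2b2 then pvYLoopA a b ct else ct) ct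

-- while ct < target: …   fuel guard only (makes the recursion total); under Pre_ the
-- Python loop terminates with a ≤ 4471, so the fuel is never exhausted
def pvLoopA (squares squared : Std.HashMap Int Int) : Nat → Int → Int → Int → Int
  | 0, _, a, _ => a
  | f + 1, target, a, ct =>
    if ct < target then
      pvLoopA squares squared f target (a + 1) (pvBLoopA squares squared (a + 1) ct)
    else a

def PE86 (target : Int) : Int :=
  pvLoopA pvTables.1 pvTables.2 4471 target 0 0

-- ===== PORT B =====
-- while c*c < s: c += 1
def pvBump (s c : Int) : Int :=
  if c * c < s then pvBump s (c + 1) else c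
termination_by (s - c).toNat
decreasing_by
  have h1 : 0 ≤ (c - 1) * (c - 1) := mul_self_nonneg _
  have h2 : c < s := by nlinarith
  omega

-- body of B's for-b loop; state = (c, ct)
def pvBStepB (a : Int) (st : Int × Int) (b : Int) : Int × Int :=
  let s := a * a + b * b
  let c := pvBump s st.1
  if c * c = s then
    let lo0 := b - a
    let lo := if lo0 < 1 then 1 else lo0
    let hi := PySem.Int.floordiv b 2
    if lo ≤ hi then (c, st.2 + (hi - lo + 1)) else (c, st.2)
  else (c, st.2)

def pvBLoopB (a c ct : Int) : Int × Int :=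
  (PySem.List.pyRange 1 (2 * a + 1) 1).foldl (pvBStepB a) (c, ct)

-- while ct < target: …   same fuel guard as A's port
def pvLoopB : Nat → Int → Int → Int → Int
  | 0, _, a, _ => a
  | f + 1, target, a, ct =>
    if ct < target then
      pvLoopB f target (a + 1) (pvBLoopB (a + 1) (a + 1) ct).2
    else a

def PE86_alt (target : Int) : Int := pvLoopB 4471 target 0 0

-- ===== PRECONDITION & SPEC =====
-- Pre_ excludes targets > 6712398, on which A's search must pass M = 4471: there A's fixed
-- square table (n < 10000) stops covering a*a+b*b, so A silently misses perfect squares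
-- (returning a too-large M) and finally raises KeyError once b reaches 10000.
-- (Both ports are fuel-bounded at 4471 iterations, so their equality is provable for every
-- target; Pre_ is what makes the fuel-bounded ports faithful to their Pythons.)
def Pre_PE86 (target : Int) : Prop := target ≤ 6712398
instance (target : Int) : Decidable (Pre_PE86 target) := by unfold Pre_PE86; infer_instance
def pvWitness_PE86 : Int := (100)

def Spec_PE86 (target : Int) (out : Int) : Prop := out = PE86_alt target
instance (target : Int) (out : Int) : Decidable (Spec_PE86 target out) := by unfold Spec_PE86; infer_instance

-- ===== CLAIM (what is proved, stated in full; the proofs are below) =====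
def Claim_equal_PE86 : Prop := ∀ (target : Int), Dom_PE86 target → Pre_PE86 target → Spec_PE86 target (PE86 target)

-- ===== LEMMAS AND PROOFS =====

-- the tables restricted to n in range(1,N)
def pvTablesUpto (N : Nat) : Std.HashMap Int Int × Std.HashMap Int Int :=
  (PySem.List.pyRange 1 (N : Int) 1).foldl
    (fun p n => let sq := n * n; (p.1.insert n sq, p.2.insert sq n))
    (∅, ∅)

theorem pvTables_eq : pvTables = pvTablesUpto 10000 := by
  unfold pvTables pvTablesUpto; norm_num

theorem pvTablesUpto_succ (N : Nat) (h : 1 ≤ N) :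
    pvTablesUpto (N + 1) =
      ((pvTablesUpto N).1.insert (N : Int) ((N : Int) * N),
       (pvTablesUpto N).2.insert ((N : Int) * N) (N : Int)) := by
  unfold pvTablesUpto
  rw [show ((N + 1 : Nat) : Int) = (N : Int) + 1 by push_cast; ring,
      PySem.List.pyRange_one_succ_right (by exact_mod_cast h), List.foldl_append]
  rfl

theorem pvTablesUpto_squares (N : Nat) :
    ∀ n : Int, 1 ≤ n → n < (N : Int) → (pvTablesUpto N).1.getD n 0 = n * n := by
  induction N with
  | zero => intro n h1 h2; omega
  | succ N ih =>
    intro n h1 h2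
    rcases Nat.eq_zero_or_pos N with hN | hN
    · subst hN; omega
    rw [pvTablesUpto_succ N hN]
    show ((pvTablesUpto N).1.insert (N : Int) ((N : Int) * N)).getD n 0 = n * n
    rw [Std.HashMap.getD_insert]
    by_cases hn : n = (N : Int)
    · simp [hn]
    · rw [if_neg (by simpa using fun h => hn h.symm)]
      exact ih n h1 (by omega)

theorem pvTablesUpto_squared (N : Nat) :
    ∀ k : Int, (pvTablesUpto N).2.contains k = true ↔
      ∃ n : Int, 1 ≤ n ∧ n < (N : Int) ∧ n * n = k := by
  induction N with
  | zero =>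
    intro k
    simp only [pvTablesUpto,
      PySem.List.pyRange_one_eq_nil (show ((0:Nat):Int) ≤ 1 by norm_num), List.foldl_nil]
    simp [Std.HashMap.contains_empty]
    intro n h1 h2; omega
  | succ N ih =>
    intro k
    rcases Nat.eq_zero_or_pos N with hN | hN
    · subst hN
      simp only [pvTablesUpto,
        PySem.List.pyRange_one_eq_nil (show ((1:Nat):Int) ≤ 1 by norm_num), List.foldl_nil]
      simp [Std.HashMap.contains_empty]
      intro n h1 h2; omega
    rw [pvTablesUpto_succ N hN]
    show ((pvTablesUpto N).2.insert ((N : Int) * N) (N : Int)).contains k = true ↔ _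
    rw [Std.HashMap.contains_insert]
    by_cases hk : k = (N : Int) * N
    · simp only [hk, BEq.rfl, Bool.true_or, true_iff]
      exact ⟨(N : Int), by exact_mod_cast hN, by push_cast; omega, rfl⟩
    · rw [show (((N : Int) * N) == k) = false by simpa using fun h => hk h.symm,
         Bool.false_or, ih k]
      constructor
      · rintro ⟨n, h1, h2, h3⟩; exact ⟨n, h1, by omega, h3⟩
      · rintro ⟨n, h1, h2, h3⟩
        refine ⟨n, h1, ?_, h3⟩
        rcases lt_or_eq_of_le (show n ≤ (N : Int) by omega) with h | h
        · exact h
        · exfalso; exact hk (by rw [← h3, h])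

-- A's y loop counts y in [1, b//2] with b-a ≤ y: closed form
theorem pvYLoopA_closed (H : Nat) (a b ct : Int) :
    (PySem.List.pyRange 1 ((H : Int) + 1) 1).foldl
      (fun ct y => ct + (if b - y ≤ a then 1 else 0)) ct =
    ct + (if max (b - a) 1 ≤ (H : Int) then (H : Int) - max (b - a) 1 + 1 else 0) := by
  induction H generalizing ct with
  | zero =>
    rw [PySem.List.pyRange_one_eq_nil (by norm_num), List.foldl_nil]
    have : ¬ (max (b - a) 1 ≤ (0 : Int)) := by omega
    simp [this]
  | succ H ih =>
    rw [show (((H + 1 : Nat) : Int) + 1) = ((H : Int) + 1) + 1 by push_cast; ring,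
        PySem.List.pyRange_one_succ_right (by omega), List.foldl_append, ih]
    simp only [List.foldl_cons, List.foldl_nil]
    push_cast
    split_ifs <;> omega

theorem pvBump_ge (s c : Int) : c ≤ pvBump s c := by
  fun_induction pvBump s c with
  | case1 c h ih => omega
  | case2 c h => omega

theorem pvBump_big (s c : Int) : s ≤ pvBump s c * pvBump s c := by
  fun_induction pvBump s c with
  | case1 c h ih => exact ih
  | case2 c h => omega

theorem pvBump_low (s c : Int) (h : (c - 1) * (c - 1) < s) :
    (pvBump s c - 1) * (pvBump s c - 1) < s := by
  fun_induction pvBump s c with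
  | case1 c h' ih =>
    refine ih ?_
    have : (c + 1 - 1) * (c + 1 - 1) = c * c := by ring
    omega
  | case2 c h' => exact h

-- A's loop body over one b, named so the fold head stays syntactic
def pvAStep (a ct b : Int) : Int :=
  let a2b2 := pvTables.1.getD a 0 + pvTables.1.getD b 0
  if pvTables.2.contains a2b2 then pvYLoopA a b ct else ct

-- the per-b equivalence of the two square tests, and the closed form vs the y loop,
-- pushed through the b range by downward induction; c carries the two-pointer invariant
theorem pvBRange_eq (a : Int) (ha1 : 1 ≤ a) (ha2 : a ≤ 4471) :
    ∀ (n : Nat) (b c ct : Int), b = 2 * a + 1 - (n : Int) → (n : Int) ≤ 2 * a →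
      a ≤ c → (c - 1) * (c - 1) < a * a + b * b →
      (PySem.List.pyRange b (2 * a + 1) 1).foldl (pvAStep a) ct =
      ((PySem.List.pyRange b (2 * a + 1) 1).foldl (pvBStepB a) (c, ct)).2 := by
  intro n
  induction n with
  | zero =>
    intro b c ct hb _ _ _
    rw [PySem.List.pyRange_one_eq_nil (by omega)]
    rfl
  | succ n ih =>
    intro b c ct hb hn hc hinv
    have hblt : b < 2 * a + 1 := by omega
    have hb1 : 1 ≤ b := by omega
    have hble : b ≤ 2 * a := by omega
    rw [PySem.List.pyRange_one_cons hblt, List.foldl_cons, List.foldl_cons]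
    have hga : pvTables.1.getD a 0 = a * a := by
      rw [pvTables_eq]
      exact pvTablesUpto_squares 10000 a ha1 (by norm_num; omega)
    have hgb : pvTables.1.getD b 0 = b * b := by
      rw [pvTables_eq]
      exact pvTablesUpto_squares 10000 b hb1 (by norm_num; omega)
    set s : Int := a * a + b * b with hs
    set c' : Int := pvBump s c with hc'
    have hcge : c ≤ c' := pvBump_ge s c
    have hbig : s ≤ c' * c' := pvBump_big s c
    have hlow : (c' - 1) * (c' - 1) < s := pvBump_low s c hinv
    have hsq_iff : pvTables.2.contains (a * a + b * b) = true ↔ c' * c' = s := by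
      rw [pvTables_eq, pvTablesUpto_squared]
      constructor
      · rintro ⟨m, hm1, hm2, hm3⟩
        have hcpos : 1 ≤ c' := by omega
        have h1 : c' ≤ m := by
          by_contra hcon
          push_neg at hcon
          have h3 : m * m ≤ (c' - 1) * (c' - 1) :=
            mul_self_le_mul_self (by omega) (by omega)
          omega
        have h2 : m ≤ c' := by
          by_contra hcon
          push_neg at hcon
          have h3 : c' * c' ≤ (m - 1) * (m - 1) :=
            mul_self_le_mul_self (by omega) (by omega)
          have h4 : (m - 1) * (m - 1) < m * m := by nlinarith
          omega
        rw [le_antisymm h1 h2]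
        exact hm3
      · intro h
        refine ⟨c', by omega, ?_, by omega⟩
        have hbb : b * b ≤ (2 * a) * (2 * a) :=
          mul_self_le_mul_self (by omega) (by omega)
        have haa : a * a ≤ 4471 * 4471 :=
          mul_self_le_mul_self (by omega) (by omega)
        have hup : c' * c' ≤ 99949205 := by nlinarith
        by_contra hcon
        push_neg at hcon
        have h5 : (10000 : Int) * 10000 ≤ c' * c' :=
          mul_self_le_mul_self (by norm_num) (by exact_mod_cast hcon)
        omega
    -- the invariant survives to b+1
    have hinv' : (c' - 1) * (c' - 1) < a * a + (b + 1) * (b + 1) := by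
      have h6 : b * b ≤ (b + 1) * (b + 1) := mul_self_le_mul_self (by omega) (by omega)
      omega
    by_cases hhit : c' * c' = s
    · have hA : pvTables.2.contains (a * a + b * b) = true := hsq_iff.mpr hhit
      have hH : PySem.Int.floordiv b 2 = ((PySem.Int.floordiv b 2).toNat : Int) := by
        rw [PySem.Int.floordiv_eq_ediv_of_pos (by norm_num)]
        omega
      have hAval : pvAStep a ct b =
          ct + (if max (b - a) 1 ≤ PySem.Int.floordiv b 2
                then PySem.Int.floordiv b 2 - max (b - a) 1 + 1 else 0) := by
        show (if pvTables.2.contains (pvTables.1.getD a 0 + pvTables.1.getD b 0)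
              then pvYLoopA a b ct else ct) = _
        rw [hga, hgb, if_pos hA]
        unfold pvYLoopA
        rw [hH]
        exact pvYLoopA_closed _ a b ct
      have hBval : pvBStepB a (c, ct) b =
          (c', ct + (if max (b - a) 1 ≤ PySem.Int.floordiv b 2
                     then PySem.Int.floordiv b 2 - max (b - a) 1 + 1 else 0)) := by
        unfold pvBStepB
        simp only [← hs, ← hc', if_pos hhit]
        have hmax : (if b - a < 1 then 1 else b - a) = max (b - a) 1 := by omega
        rw [hmax]
        by_cases hiflo : max (b - a) 1 ≤ PySem.Int.floordiv b 2
        · rw [if_pos hiflo, if_pos hiflo]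
        · rw [if_neg hiflo, if_neg hiflo]
          simp
      rw [hAval, hBval]
      exact ih (b + 1) c' _ (by omega) (by omega) (by omega) hinv'
    · have hA : pvTables.2.contains (a * a + b * b) = false := by
        by_contra hcon
        exact hhit (hsq_iff.mp (by simpa using hcon))
      have hAval : pvAStep a ct b = ct := by
        show (if pvTables.2.contains (pvTables.1.getD a 0 + pvTables.1.getD b 0)
              then pvYLoopA a b ct else ct) = _
        rw [hga, hgb, hA]
        simp
      have hBval : pvBStepB a (c, ct) b = (c', ct) := by
        unfold pvBStepB
        simp only [← hs, ← hc', if_neg hhit]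
      rw [hAval, hBval]
      exact ih (b + 1) c' _ (by omega) (by omega) (by omega) hinv'

theorem pvBLoop_eq (a ct : Int) (ha1 : 1 ≤ a) (ha2 : a ≤ 4471) :
    pvBLoopA pvTables.1 pvTables.2 a ct = (pvBLoopB a a ct).2 := by
  have h := pvBRange_eq a ha1 ha2 (2 * a).toNat 1 a ct (by omega) (by omega) le_rfl
    (by nlinarith)
  unfold pvBLoopA pvBLoopB
  exact h

theorem pvLoop_eq (f : Nat) :
    ∀ (target a ct : Int), 0 ≤ a → a + (f : Int) ≤ 4471 →
      pvLoopA pvTables.1 pvTables.2 f target a ct = pvLoopB f target a ct := by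
  induction f with
  | zero => intro target a ct _ _; rfl
  | succ f ih =>
    intro target a ct ha hf
    unfold pvLoopA pvLoopB
    by_cases h : ct < target
    · rw [if_pos h, if_pos h, pvBLoop_eq (a + 1) ct (by omega) (by omega)]
      exact ih target (a + 1) _ (by omega) (by push_cast at hf ⊢; omega)
    · rw [if_neg h, if_neg h]

-- ===== VERDICT (by name: the statement is the Claim_ definition above) =====
theorem PE86_spec : Claim_equal_PE86 := by
  intro target _ _
  unfold Spec_PE86 PE86 PE86_alt
  exact pvLoop_eq 4471 target 0 0 le_rfl (by norm_num)
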